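-- pv_equiv track=rewrite | github.com/dwarmstrong/homebin | datetag.py | value_date_min
-- ===== SOURCE A (Python) =====
-- def value_date_min(dictionary):
--     """Find the minimum value and the date(s) it was recorded."""
--     val_date = dictionary
--     min_val = {}
--     # Set a starting date and value for minimum.
--     m_date = list(val_date)[0]
--     m_value = val_date[m_date]
--     min_val[m_date] = m_value
--     for key, value in val_date.items():
--         if value < m_value:
--             m_value = value
--             m_date = key
--             min_val = {}
--             min_val[m_date] = m_value
--         elif value == m_value:
--             min_val[key] = value
--     return min_val
-- ===== SOURCE B (Python) =====
-- def value_date_min(dictionary):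
--     """Find the minimum value and the date(s) it was recorded."""
--     m = min(dictionary.values())
--     return {k: v for k, v in dictionary.items() if v == m}
-- ===== Notes on version B (the rewrite author's own statement) =====
-- stated objective: simpler
-- what changed: A's single running-min pass that rebuilds a collecting dict on every new minimum is replaced by two plain passes: compute m = min(dictionary.values()), then keep the items equal to m with a dict comprehension.
import Mathlib
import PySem

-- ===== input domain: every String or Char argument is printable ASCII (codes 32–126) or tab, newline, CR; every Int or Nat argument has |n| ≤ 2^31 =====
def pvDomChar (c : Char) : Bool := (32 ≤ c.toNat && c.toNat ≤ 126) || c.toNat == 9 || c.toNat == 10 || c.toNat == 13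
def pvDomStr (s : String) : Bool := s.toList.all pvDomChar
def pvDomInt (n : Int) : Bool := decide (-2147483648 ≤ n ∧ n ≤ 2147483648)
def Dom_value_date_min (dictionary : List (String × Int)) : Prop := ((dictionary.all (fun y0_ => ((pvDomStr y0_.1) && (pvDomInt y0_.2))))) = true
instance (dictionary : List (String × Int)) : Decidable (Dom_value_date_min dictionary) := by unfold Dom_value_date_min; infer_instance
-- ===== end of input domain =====

-- B replaces A's running-min-and-collect pass by two simpler passes (min of the values, then filter); same cost, plainer code.


-- ===== PORT A =====
-- loop body of A's 'for key, value in val_date.items(): …'; state = (m_value, m_date, min_val)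
def vdmStep (st : Int × String × PySem.Dict String Int) (kv : String × Int) :
    Int × String × PySem.Dict String Int :=
  if kv.2 < st.1 then (kv.2, kv.1, PySem.Dict.empty.insert kv.1 kv.2)
  else if kv.2 == st.1 then (st.1, st.2.1, st.2.2.insert kv.1 kv.2)
  else st

def value_date_min (dictionary : List (String × Int)) : List (String × Int) :=
  let val_date := PySem.Dict.mk dictionary
  match PySem.List.pyGet? val_date.keys 0 with
  | none => []                 -- list(val_date)[0] raises IndexError on the empty dict; excluded by Pre_
  | some m_date =>
    match val_date.get? m_date with
    | none => []               -- unreachable: m_date is a key of val_date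
    | some m_value =>
      let min_val := PySem.Dict.empty.insert m_date m_value
      let r := val_date.items.foldl vdmStep (m_value, m_date, min_val)
      r.2.2.items

-- ===== PORT B =====
def value_date_min_alt (dictionary : List (String × Int)) : List (String × Int) :=
  match PySem.List.min? (dictionary.map (fun p => p.2)) (fun x => x) with
  | none => []                 -- min() raises ValueError on the empty dict; excluded by Pre_
  | some m =>
    ((dictionary.filter (fun p => p.2 == m)).foldl
      (fun acc p => acc.insert p.1 p.2) PySem.Dict.empty).items

-- ===== PRECONDITION & SPEC =====
-- Pre_ excludes the empty dict (A raises IndexError there) and association lists with duplicate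
-- keys, which do not represent any Python dict argument (the parameter is a dict).
def Pre_value_date_min (dictionary : List (String × Int)) : Prop :=
  dictionary ≠ [] ∧ (dictionary.map Prod.fst).Nodup
instance (dictionary : List (String × Int)) : Decidable (Pre_value_date_min dictionary) := by
  unfold Pre_value_date_min; infer_instance
def pvWitness_value_date_min : (List (String × Int)) := [("2020-01-01", 3), ("2020-01-02", 1)]

def Spec_value_date_min (dictionary : List (String × Int)) (out : List (String × Int)) : Prop := out = value_date_min_alt dictionary
instance (dictionary : List (String × Int)) (out : List (String × Int)) : Decidable (Spec_value_date_min dictionary out) := by unfold Spec_value_date_min; infer_instance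

-- ===== CLAIM (what is proved, stated in full; the proofs are below) =====
def Claim_equal_value_date_min : Prop := ∀ (dictionary : List (String × Int)), Dom_value_date_min dictionary → Pre_value_date_min dictionary → Spec_value_date_min dictionary (value_date_min dictionary)

-- ===== LEMMAS AND PROOFS =====

-- the singleton dict {k: v}, spelled as A builds it
lemma items_ins_empty (k : String) (v : Int) :
    (PySem.Dict.empty.insert k v).items = [(k, v)] := by
  simp [PySem.Dict.items_insert_of_not_contains, PySem.Dict.empty]

lemma keys_ins_empty (k : String) (v : Int) :
    (PySem.Dict.empty.insert k v).keys = [k] := by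
  simp [PySem.Dict.keys, items_ins_empty]

-- inserting the pair it already holds leaves a singleton dict unchanged
lemma insert_singleton_self (k : String) (v : Int) :
    (PySem.Dict.empty.insert k v).insert k v = PySem.Dict.empty.insert k v := by
  apply PySem.Dict.ext
  simp [PySem.Dict.items_insert, PySem.Dict.contains_insert_self, PySem.Dict.empty]

lemma foldl_min_eq_self (l : List Int) (a : Int) (h : ∀ x ∈ l, a ≤ x) :
    l.foldl min a = a := by
  rcases PySem.List.foldl_min_mem l a with h1 | h1
  · exact h1
  · exact le_antisymm (PySem.List.foldl_min_le l a).1 (h _ h1)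

lemma foldl_min_lt (l : List Int) (a : Int) (h : ∃ x ∈ l, x < a) :
    l.foldl min a < a := by
  obtain ⟨x, hx, hlt⟩ := h
  exact lt_of_le_of_lt ((PySem.List.foldl_min_le l a).2 x hx) hlt

-- characterisation of A's loop over the remaining items t
lemma vdm_loop_char (t : List (String × Int)) (mv : Int) (md : String)
    (acc : PySem.Dict String Int)
    (hnd : (t.map Prod.fst).Nodup)
    (hfresh : ∀ p ∈ t, p.1 ∉ acc.keys) :
    (t.foldl vdmStep (mv, md, acc)).2.2.items =
      if ∀ p ∈ t, mv ≤ p.2 then acc.items ++ t.filter (fun p => p.2 == mv)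
      else t.filter (fun p => p.2 == (t.map Prod.snd).foldl min mv) := by
  induction t generalizing mv md acc with
  | nil => simp
  | cons p t ih =>
    obtain ⟨pk, pv⟩ := p
    simp only [List.map_cons, List.nodup_cons] at hnd
    obtain ⟨hp_notin, hndt⟩ := hnd
    simp only [List.foldl_cons, vdmStep, List.map_cons]
    by_cases h1 : pv < mv
    · rw [if_pos h1]
      rw [ih pv pk _ hndt
          (by intro q hq hmem
              rw [keys_ins_empty] at hmem
              exact hp_notin (List.mem_singleton.mp hmem ▸ List.mem_map_of_mem hq))]
      have hcnot : ¬ ∀ q ∈ (pk, pv) :: t, mv ≤ q.2 := by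
        intro hc
        exact absurd (hc (pk, pv) List.mem_cons_self) (by simp; omega)
      rw [if_neg hcnot, min_eq_right (le_of_lt h1)]
      by_cases hall : ∀ q ∈ t, pv ≤ q.2
      · rw [if_pos hall, items_ins_empty,
            foldl_min_eq_self _ _ (by
              intro x hx
              obtain ⟨q, hq, rfl⟩ := List.mem_map.mp hx
              exact hall q hq)]
        simp
      · rw [if_neg hall]
        have hM : (t.map Prod.snd).foldl min pv < pv := by
          push_neg at hall
          obtain ⟨q, hq, hlt⟩ := hall
          exact foldl_min_lt _ _ ⟨q.2, List.mem_map_of_mem hq, hlt⟩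
        rw [List.filter_cons]
        simp [(show (pv == ((t.map Prod.snd).foldl min pv)) = false from
          beq_eq_false_iff_ne.mpr (by omega))]
    · by_cases hb2 : (pv == mv) = true
      · have h2 : pv = mv := by simpa using hb2
        rw [if_neg h1, if_pos hb2]
        have hcon : acc.contains pk = false := by
          have h := hfresh (pk, pv) List.mem_cons_self
          cases hcc : acc.contains pk
          · rfl
          · exact absurd ((PySem.Dict.contains_iff_mem_keys acc pk).mp hcc) h
        have hins : (acc.insert pk pv).items = acc.items ++ [(pk, pv)] := by
          rw [PySem.Dict.items_insert]
          simp [hcon]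
        rw [ih mv md (acc.insert pk pv) hndt
            (by intro q hq hmem
                rcases (PySem.Dict.mem_keys_insert acc pk q.1 pv).mp hmem with h | h
                · exact hp_notin (h ▸ List.mem_map_of_mem hq)
                · exact hfresh q (List.mem_cons_of_mem _ hq) h)]
        rw [hins]
        by_cases hall : ∀ q ∈ t, mv ≤ q.2
        · have hcall : ∀ q ∈ (pk, pv) :: t, mv ≤ q.2 := by
            intro q hq
            rcases List.mem_cons.mp hq with rfl | hq'
            · simp; omega
            · exact hall q hq'
          rw [if_pos hall, if_pos hcall, List.filter_cons]
          simp [hb2, List.append_assoc]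
        · have hcnot : ¬ ∀ q ∈ (pk, pv) :: t, mv ≤ q.2 := by
            intro hc
            exact hall fun q hq => hc q (List.mem_cons_of_mem _ hq)
          rw [if_neg hall, if_neg hcnot, min_eq_left (le_of_eq h2.symm)]
          have hM : (t.map Prod.snd).foldl min mv < mv := by
            push_neg at hall
            obtain ⟨q, hq, hlt⟩ := hall
            exact foldl_min_lt _ _ ⟨q.2, List.mem_map_of_mem hq, hlt⟩
          rw [List.filter_cons]
          simp [(show (pv == ((t.map Prod.snd).foldl min mv)) = false from
            beq_eq_false_iff_ne.mpr (by omega))]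
      · have h3 : mv < pv := by
          have hne : pv ≠ mv := by
            intro he
            simp [he] at hb2
          omega
        rw [if_neg h1, if_neg hb2]
        rw [ih mv md acc hndt (fun q hq => hfresh q (List.mem_cons_of_mem _ hq))]
        have hbf : (pv == mv) = false := beq_eq_false_iff_ne.mpr (by omega)
        by_cases hall : ∀ q ∈ t, mv ≤ q.2
        · have hcall : ∀ q ∈ (pk, pv) :: t, mv ≤ q.2 := by
            intro q hq
            rcases List.mem_cons.mp hq with rfl | hq'
            · simp; omega
            · exact hall q hq'
          rw [if_pos hall, if_pos hcall, List.filter_cons]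
          simp [hbf]
        · have hcnot : ¬ ∀ q ∈ (pk, pv) :: t, mv ≤ q.2 := by
            intro hc
            exact hall fun q hq => hc q (List.mem_cons_of_mem _ hq)
          rw [if_neg hall, if_neg hcnot, min_eq_left (le_of_lt h3)]
          have hM : (t.map Prod.snd).foldl min mv < mv := by
            push_neg at hall
            obtain ⟨q, hq, hlt⟩ := hall
            exact foldl_min_lt _ _ ⟨q.2, List.mem_map_of_mem hq, hlt⟩
          rw [List.filter_cons]
          simp [(show (pv == ((t.map Prod.snd).foldl min mv)) = false from
            beq_eq_false_iff_ne.mpr (by omega))]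

-- ===== VERDICT (by name: the statement is the Claim_ definition above) =====
theorem value_date_min_spec : Claim_equal_value_date_min := by
  intro d _ hpre
  obtain ⟨hne, hnd⟩ := hpre
  unfold Spec_value_date_min
  cases d with
  | nil => exact absurd rfl hne
  | cons p0 rest =>
    obtain ⟨k0, v0⟩ := p0
    simp only [List.map_cons, List.nodup_cons] at hnd
    obtain ⟨hk0, hndr⟩ := hnd
    unfold value_date_min value_date_min_alt
    have hsnd : (fun (p : String × Int) => p.2) = Prod.snd := rfl
    simp only [hsnd, PySem.Dict.keys_mk, List.map_cons, PySem.List.pyGet?, PySem.List.pyIdx?]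
    norm_num
    rw [PySem.Dict.get?_mk_cons]
    simp only [BEq.rfl, if_pos]
    -- A's loop: its first iteration re-inserts the starting pair, a no-op
    have hstep : vdmStep (v0, k0, PySem.Dict.empty.insert k0 v0) (k0, v0)
        = (v0, k0, PySem.Dict.empty.insert k0 v0) := by
      simp [vdmStep, insert_singleton_self]
    show ((((k0, v0) :: rest).foldl vdmStep (v0, k0, PySem.Dict.empty.insert k0 v0)).2.2.items) = _
    rw [List.foldl_cons, hstep,
        vdm_loop_char rest v0 k0 _ hndr
          (by intro q hq hmem
              rw [keys_ins_empty] at hmem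
              exact hk0 (List.mem_singleton.mp hmem ▸ List.mem_map_of_mem hq))]
    -- B's side: min of the values, then the filtered comprehension
    simp only [PySem.List.min?_id_cons]
    have hfil : ∀ (m : Int),
        ((((k0, v0) :: rest).filter (fun p => p.2 == m)).foldl
          (fun acc p => acc.insert p.1 p.2) PySem.Dict.empty).items
        = ((k0, v0) :: rest).filter (fun p => p.2 == m) := by
      intro m
      have hsub : ((((k0, v0) :: rest).filter (fun p => p.2 == m)).map Prod.fst).Sublist
          (((k0, v0) :: rest).map Prod.fst) :=
        List.Sublist.map Prod.fst (List.filter_sublist)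
      rw [PySem.Dict.items_foldl_insert_fresh _ _ _ _
            (by intro a _; exact PySem.Dict.contains_empty _)
            ((by simpa using List.nodup_cons.mpr ⟨hk0, hndr⟩ :
              (((k0, v0) :: rest).map Prod.fst).Nodup).sublist hsub)]
      simp [PySem.Dict.empty]
    rw [hfil]
    by_cases hall : ∀ q ∈ rest, v0 ≤ q.2
    · rw [if_pos hall, items_ins_empty,
          foldl_min_eq_self _ _ (by
            intro x hx
            obtain ⟨q, hq, rfl⟩ := List.mem_map.mp hx
            exact hall q hq)]
      simp
    · rw [if_neg hall]
      have hM : (rest.map Prod.snd).foldl min v0 < v0 := by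
        push_neg at hall
        obtain ⟨q, hq, hlt⟩ := hall
        exact foldl_min_lt _ _ ⟨q.2, List.mem_map_of_mem hq, hlt⟩
      rw [List.filter_cons]
      simp [(show (v0 == ((rest.map Prod.snd).foldl min v0)) = false from
        beq_eq_false_iff_ne.mpr (by omega))]
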